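-- pv_equiv track=rewrite | github.com/wyk18703232953/myResearch | codeComplex/data/filteredData/python/quadratic/python_quadratic_0097.py | solve
-- ===== SOURCE A (Python) =====
-- def solve(board):
--     n = len(board)
--     ans = 0
--     for i in range(n):
--         for j in range(n):
--             if board[i][j] == 'X':
--                 ans += 2 ** (i * n + j)
--     return ans
-- ===== SOURCE B (Python) =====
-- def solve(board):
--     n = len(board)
--     acc = 0
--     for i in reversed(range(n)):
--         for j in reversed(range(n)):
--             acc = acc * 2 + (1 if board[i][j] == 'X' else 0)
--     return acc
-- ===== Notes on version B (the rewrite author's own statement) =====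
-- stated objective: alternative
-- what changed: B replaces A's per-cell 2**(i*n+j) power accumulation with a Horner-style scheme: it walks the cells in descending position order and maintains acc = acc*2 + bit, never computing a power.
import Mathlib
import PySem

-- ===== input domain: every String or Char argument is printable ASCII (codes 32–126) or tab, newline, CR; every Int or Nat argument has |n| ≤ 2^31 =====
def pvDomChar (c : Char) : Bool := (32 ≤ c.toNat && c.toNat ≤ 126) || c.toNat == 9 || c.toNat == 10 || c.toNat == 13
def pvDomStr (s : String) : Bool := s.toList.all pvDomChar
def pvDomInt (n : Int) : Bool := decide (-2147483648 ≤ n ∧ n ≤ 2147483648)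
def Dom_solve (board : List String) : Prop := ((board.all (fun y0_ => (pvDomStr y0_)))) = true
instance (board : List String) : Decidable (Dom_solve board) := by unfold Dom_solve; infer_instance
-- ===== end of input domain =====

-- B encodes the board's 'X' cells by a Horner-style walk in descending position order
-- (acc = acc*2 + bit) instead of A's 2**(i*n+j) power accumulation; alternative, same cost.


-- ===== PORT A =====
-- for i in range(n): for j in range(n): if board[i][j] == 'X': ans += 2 ** (i*n+j)
def solve (board : List String) : Int :=
  let n : Int := (board.length : Int)
  (PySem.List.pyRange 0 n 1).foldl (fun ans i =>
    (PySem.List.pyRange 0 n 1).foldl (fun ans j =>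
      if ((PySem.List.pyGet? board i).bind (fun row => PySem.Str.pyGet? row j)) = some 'X'
      then ans + 2 ^ (i * n + j).toNat else ans) ans) 0

-- ===== PORT B =====
-- for i in reversed(range(n)): for j in reversed(range(n)): acc = acc*2 + (1 if board[i][j]=='X' else 0)
def solve_alt (board : List String) : Int :=
  let n : Int := (board.length : Int)
  ((PySem.List.pyRange 0 n 1).reverse).foldl (fun acc i =>
    ((PySem.List.pyRange 0 n 1).reverse).foldl (fun acc j =>
      acc * 2 + (if ((PySem.List.pyGet? board i).bind (fun row => PySem.Str.pyGet? row j)) = some 'X'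
                 then 1 else 0)) acc) 0

-- ===== PRECONDITION & SPEC =====
-- A (and B) raise IndexError when some row is shorter than the board: board[i][j] with j in range(len(board)).
def Pre_solve (board : List String) : Prop := ∀ s ∈ board, board.length ≤ s.toList.length
instance (board : List String) : Decidable (Pre_solve board) := by unfold Pre_solve; infer_instance

def pvWitness_solve : List String := ["X.", ".X"]

def Spec_solve (board : List String) (out : Int) : Prop := out = solve_alt board
instance (board : List String) (out : Int) : Decidable (Spec_solve board out) := by unfold Spec_solve; infer_instance

-- ===== CLAIM (what is proved, stated in full; the proofs are below) =====
def Claim_equal_solve : Prop := ∀ (board : List String), Dom_solve board → Pre_solve board → Spec_solve board (solve board)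

-- ===== LEMMAS AND PROOFS =====

-- the bit of cell (a, b), shared shape of both ports' tests
def pvBit (board : List String) (a b : Nat) : Int :=
  if ((PySem.List.pyGet? board (a : Int)).bind (fun row => PySem.Str.pyGet? row (b : Int))) = some 'X'
  then 1 else 0

-- Horner fold over a descending index range
lemma pv_horner (B : Int) (g : Nat → Int) :
    ∀ (m : Nat) (c : Int),
      ((List.range m).reverse).foldl (fun a k => a * B + g k) c
        = c * B ^ m + ((List.range m).map (fun k => g k * B ^ k)).sum := by
  intro m
  induction m with
  | zero => intro c; simp
  | succ m ih =>
      intro c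
      rw [List.range_succ, List.reverse_append]
      simp only [List.reverse_cons, List.reverse_nil, List.nil_append, List.singleton_append,
        List.foldl_cons, List.map_append, List.map_cons, List.map_nil, List.sum_append]
      rw [ih]
      simp [pow_succ]
      ring

-- A's double sum
lemma pv_solve_eq (board : List String) :
    solve board
      = ((List.range board.length).map (fun a =>
          ((List.range board.length).map (fun b =>
            pvBit board a b * 2 ^ (a * board.length + b))).sum)).sum := by
  unfold solve
  dsimp only
  rw [PySem.List.pyRange_zero_nat, List.foldl_map]
  have hin : ∀ (a : Nat) (ans : Int),
      (List.map (fun k : Nat => (k : Int)) (List.range board.length)).foldl (fun ans j =>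
        if ((PySem.List.pyGet? board (a : Int)).bind (fun row => PySem.Str.pyGet? row j)) = some 'X'
        then ans + 2 ^ ((a : Int) * (board.length : Int) + j).toNat else ans) ans
      = ans + ((List.range board.length).map (fun b =>
            pvBit board a b * 2 ^ (a * board.length + b))).sum := by
    intro a ans
    rw [List.foldl_map]
    have hstep : ∀ (ans : Int) (b : Nat),
        (if ((PySem.List.pyGet? board (a : Int)).bind (fun row => PySem.Str.pyGet? row ((b : Nat) : Int))) = some 'X'
         then ans + 2 ^ ((a : Int) * (board.length : Int) + ((b : Nat) : Int)).toNat else ans)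
        = ans + pvBit board a b * 2 ^ (a * board.length + b) := by
      intro ans b
      unfold pvBit
      have he : ((a : Int) * (board.length : Int) + ((b : Nat) : Int)).toNat = a * board.length + b := by
        omega
      split_ifs with h <;> simp [he]
    simp only [hstep]
    exact PySem.List.foldl_add _ _ _
  simp only [hin]
  rw [PySem.List.foldl_add (List.range board.length)
    (fun a => ((List.range board.length).map (fun b =>
      pvBit board a b * 2 ^ (a * board.length + b))).sum) 0]
  simp

-- B's Horner walk equals the same double sum
lemma pv_solve_alt_eq (board : List String) :
    solve_alt board
      = ((List.range board.length).map (fun a =>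
          ((List.range board.length).map (fun b =>
            pvBit board a b * 2 ^ (a * board.length + b))).sum)).sum := by
  unfold solve_alt
  dsimp only
  rw [PySem.List.pyRange_zero_nat, ← List.map_reverse, List.foldl_map]
  have hin : ∀ (a : Nat) (acc : Int),
      (List.map (fun k : Nat => (k : Int)) ((List.range board.length).reverse)).foldl (fun acc j =>
        acc * 2 + (if ((PySem.List.pyGet? board (a : Int)).bind (fun row => PySem.Str.pyGet? row j)) = some 'X'
                   then 1 else 0)) acc
      = acc * 2 ^ board.length
        + ((List.range board.length).map (fun b => pvBit board a b * 2 ^ b)).sum := by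
    intro a acc
    rw [List.foldl_map]
    exact pv_horner 2 (fun b => pvBit board a b) board.length acc
  simp only [hin]
  rw [pv_horner (2 ^ (board.length : Nat))
    (fun a => ((List.range board.length).map (fun b => pvBit board a b * 2 ^ b)).sum)
    board.length 0]
  rw [zero_mul, zero_add]
  congr 1
  apply List.map_congr_left
  intro a _
  rw [← List.sum_map_mul_right]
  congr 1
  apply List.map_congr_left
  intro b _
  rw [← pow_mul, mul_assoc, ← pow_add]
  congr 2
  ring

-- ===== VERDICT (by name: the statement is the Claim_ definition above) =====
theorem solve_spec : Claim_equal_solve := by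
  intro board _ _
  unfold Spec_solve
  rw [pv_solve_eq, pv_solve_alt_eq]
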